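-- pv_equiv track=rewrite | github.com/gahson/Advent-Of-Code | 2025/Day3/lobby.py | lobby2
-- ===== SOURCE A (Python) =====
-- def lobby2(data):
--     s = 0
--     for bank in data:
--         stack = []
--         to_rem = len(bank) - 12
--         for d in bank:
--             while to_rem > 0 and stack and stack[-1] < d:
--                 stack.pop()
--                 to_rem -= 1
--             stack.append(d)
--         stack = stack[:12]
--         st = 0
--         for num in stack:
--             st *= 10
--             st += num
--         s += st
--     return s
-- ===== SOURCE B (Python) =====
-- def lobby2(data):
--     total = 0
--     for bank in data:
--         k = min(12, len(bank))
--         rest = bank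
--         num = 0
--         while k > 0:
--             m = max(rest[:len(rest) - k + 1])
--             i = rest.index(m)
--             num = num * 10 + m
--             rest = rest[i + 1:]
--             k -= 1
--         total += num
--     return total
-- ===== Notes on version B (the rewrite author's own statement) =====
-- stated objective: alternative
-- what changed: Replaces the budgeted monotonic-stack pass (pop while smaller, then truncate to 12) with a window-greedy selection: repeatedly take the leftmost maximum of the feasible prefix window and continue after it, folding the chosen digits into the number on the fly.
import Mathlib
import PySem

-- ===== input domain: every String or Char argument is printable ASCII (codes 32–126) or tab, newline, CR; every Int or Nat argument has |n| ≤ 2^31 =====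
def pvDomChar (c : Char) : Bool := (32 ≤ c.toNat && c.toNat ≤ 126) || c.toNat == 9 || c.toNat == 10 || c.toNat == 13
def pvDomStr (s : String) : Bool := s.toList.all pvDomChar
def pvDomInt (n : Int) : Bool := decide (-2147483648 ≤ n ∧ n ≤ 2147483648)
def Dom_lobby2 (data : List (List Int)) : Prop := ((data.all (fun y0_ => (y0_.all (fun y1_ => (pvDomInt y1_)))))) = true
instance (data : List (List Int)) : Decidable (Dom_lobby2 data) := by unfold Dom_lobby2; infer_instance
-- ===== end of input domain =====

-- B replaces A's budgeted monotonic-stack pass with a window-greedy selection (alternative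
-- decomposition, similar cost); both are proved to return the same sum.

-- ===== PORT A =====
-- the inner `while to_rem > 0 and stack and stack[-1] < d: stack.pop(); to_rem -= 1`;
-- the stack is stored top-first (Python appends/pops at the right end)
def popLoop : List Int → Int → Int → List Int × Int
  | [], r, _ => ([], r)
  | t :: rest, r, d => if r > 0 ∧ t < d then popLoop rest (r - 1) d else (t :: rest, r)

-- one iteration of `for d in bank` (state = (stack top-first, to_rem))
def lobbyStep (st : List Int × Int) (d : Int) : List Int × Int :=
  let p := popLoop st.1 st.2 d
  (d :: p.1, p.2)

-- the whole body for one bank: build the stack, `stack = stack[:12]` (the stack is stored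
-- top-first, so Python's bottom-first list is .1.reverse), then fold the digits into st
def bankVal (bank : List Int) : Int :=
  let res := bank.foldl lobbyStep ([], (bank.length : Int) - 12)
  ((res.1.reverse).take 12).foldl (fun st num => st * 10 + num) 0

def lobby2 (data : List (List Int)) : Int :=
  data.foldl (fun s bank => s + bankVal bank) 0

-- ===== PORT B =====
-- the `while k > 0` loop of Source B: window = rest[:len(rest)-k+1] (here the Nat k is the
-- Python k minus 1, so the slice end len-k is exact and clamps to empty like the slice),
-- m = max(window) (raises on an empty window: unreachable since k ≤ len(rest) at every
-- call), i = rest.index(m), accumulate num, continue on rest[i+1:]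
def pickNum : Nat → List Int → Int → Int
  | 0, _, num => num
  | k+1, rest, num =>
    match PySem.List.max? (rest.take (rest.length - k)) (fun x => x) with
    | none => num          -- Python max([]) raises; never reached
    | some m =>
      match PySem.List.index? rest m with
      | none => num        -- unreachable: m ∈ rest
      | some i => pickNum k (rest.drop (i + 1)) (num * 10 + m)

def lobby2_alt (data : List (List Int)) : Int :=
  data.foldl (fun total bank => total + pickNum (min 12 bank.length) bank 0) 0

-- ===== PRECONDITION & SPEC =====
def Spec_lobby2 (data : List (List Int)) (out : Int) : Prop := out = lobby2_alt data
instance (data : List (List Int)) (out : Int) : Decidable (Spec_lobby2 data out) := by unfold Spec_lobby2; infer_instance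

-- ===== CLAIM (what is proved, stated in full; the proofs are below) =====
def Claim_equal_lobby2 : Prop := ∀ (data : List (List Int)), Dom_lobby2 data → Spec_lobby2 data (lobby2 data)

-- ===== LEMMAS AND PROOFS =====

-- proof-side list version of pickNum's chosen digits
def pickL : Nat → List Int → List Int
  | 0, _ => []
  | k+1, rest =>
    match PySem.List.max? (rest.take (rest.length - k)) (fun x => x) with
    | none => []
    | some m =>
      match PySem.List.index? rest m with
      | none => []
      | some i => m :: pickL k (rest.drop (i + 1))

theorem pickNum_eq_foldl (k : Nat) : ∀ (rest : List Int) (num : Int),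
    pickNum k rest num = (pickL k rest).foldl (fun a d => a * 10 + d) num := by
  induction k with
  | zero => intro rest num; simp [pickNum, pickL]
  | succ k ih =>
    intro rest num
    simp only [pickNum, pickL]
    cases hm : PySem.List.max? (rest.take (rest.length - k)) (fun x => x) with
    | none => simp
    | some m =>
      cases hi : List.idxOf? m rest with
      | none => simp [PySem.List.index?_eq_idxOf?, hi]
      | some i => simp [PySem.List.index?_eq_idxOf?, hi, ih]

theorem popLoop_snd (S : List Int) (r d : Int) :
    (popLoop S r d).2 = r + ((popLoop S r d).1.length : Int) - (S.length : Int) := by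
  induction S generalizing r with
  | nil => simp [popLoop]
  | cons t rest ih =>
    simp only [popLoop]
    split_ifs with h
    · have := ih (r - 1)
      push_cast [List.length_cons] at this ⊢
      omega
    · simp

theorem popLoop_mem (S : List Int) (r d : Int) :
    ∀ x ∈ (popLoop S r d).1, x ∈ S := by
  induction S generalizing r with
  | nil => simp [popLoop]
  | cons t rest ih =>
    simp only [popLoop]
    split_ifs with h
    · intro x hx
      exact List.mem_cons_of_mem _ (ih (r - 1) x hx)
    · intro x hx; exact hx

theorem popLoop_all_lt (S : List Int) (r d : Int)
    (h : ∀ x ∈ S, x < d) (hr : (S.length : Int) ≤ r) :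
    popLoop S r d = ([], r - (S.length : Int)) := by
  induction S generalizing r with
  | nil => simp [popLoop]
  | cons t rest ih =>
    push_cast [List.length_cons] at hr
    have htd : t < d := h t (List.mem_cons_self ..)
    have h0 : r > 0 := by
      have : (0 : Int) ≤ (rest.length : Int) := by positivity
      omega
    simp only [popLoop, if_pos (And.intro h0 htd)]
    rw [ih (r - 1) (fun x hx => h x (List.mem_cons_of_mem _ hx)) (by omega)]
    push_cast [List.length_cons]
    congr 1
    omega

theorem popLoop_nonpos (S : List Int) (r d : Int) (h : r ≤ 0) :
    popLoop S r d = (S, r) := by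
  cases S with
  | nil => simp [popLoop]
  | cons t rest =>
    simp only [popLoop]
    rw [if_neg (fun hc => absurd hc.1 (by omega))]

theorem run_snd (xs : List Int) : ∀ (S : List Int) (r : Int),
    (xs.foldl lobbyStep (S, r)).2
      = r + ((xs.foldl lobbyStep (S, r)).1.length : Int) - (S.length : Int) - (xs.length : Int) := by
  induction xs with
  | nil => intro S r; simp
  | cons d xs ih =>
    intro S r
    simp only [List.foldl_cons, lobbyStep]
    have h1 := ih (d :: (popLoop S r d).1) (popLoop S r d).2
    have h2 := popLoop_snd S r d
    push_cast [List.length_cons] at h1 h2 ⊢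
    omega

theorem run_mem (xs : List Int) : ∀ (S : List Int) (r : Int),
    ∀ x ∈ (xs.foldl lobbyStep (S, r)).1, x ∈ S ∨ x ∈ xs := by
  induction xs with
  | nil => intro S r x hx; exact Or.inl hx
  | cons d xs ih =>
    intro S r x hx
    simp only [List.foldl_cons, lobbyStep] at hx
    rcases ih _ _ x hx with h | h
    · rcases List.mem_cons.mp h with h | h
      · exact Or.inr (by simp [h])
      · exact Or.inl (popLoop_mem S r d x h)
    · exact Or.inr (List.mem_cons_of_mem _ h)

theorem run_nonpos (xs : List Int) : ∀ (S : List Int) (r : Int), r ≤ 0 →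
    xs.foldl lobbyStep (S, r) = (xs.reverse ++ S, r) := by
  induction xs with
  | nil => intro S r _; simp
  | cons d xs ih =>
    intro S r hr
    simp only [List.foldl_cons, lobbyStep, popLoop_nonpos S r d hr]
    rw [ih (d :: S) r hr]
    simp

theorem popLoop_append_cons (S : List Int) (m : Int) : ∀ (r d r₁ : Int) (h : Int) (tS : List Int),
    popLoop S r d = (h :: tS, r₁) →
    popLoop (S ++ [m]) r d = (h :: (tS ++ [m]), r₁) := by
  induction S with
  | nil => intro r d r₁ h tS hyp; simp [popLoop] at hyp
  | cons t rest ih =>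
    intro r d r₁ h tS hyp
    simp only [popLoop, List.cons_append] at hyp ⊢
    split_ifs with hc
    · rw [if_pos hc] at hyp
      exact ih (r - 1) d r₁ h tS hyp
    · rw [if_neg hc] at hyp
      obtain ⟨h1, h2⟩ := Prod.mk.injEq .. ▸ hyp
      obtain ⟨h3, h4⟩ := List.cons.injEq .. ▸ h1
      subst h3; subst h4; subst h2
      rfl

theorem popLoop_append_nil (S : List Int) (m : Int) : ∀ (r d r₁ : Int),
    popLoop S r d = ([], r₁) →
    popLoop (S ++ [m]) r d = popLoop [m] r₁ d := by
  induction S with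
  | nil =>
    intro r d r₁ hyp
    simp [popLoop] at hyp
    rw [List.nil_append, hyp]
  | cons t rest ih =>
    intro r d r₁ hyp
    simp only [popLoop] at hyp
    by_cases hc : r > 0 ∧ t < d
    · rw [if_pos hc] at hyp
      have h2 := ih (r - 1) d r₁ hyp
      have h3 : popLoop ((t :: rest) ++ [m]) r d = popLoop (rest ++ [m]) (r - 1) d := by
        simp only [List.cons_append, popLoop, if_pos hc]
      rw [h3, h2]
    · rw [if_neg hc] at hyp
      simp at hyp

-- appending a bottom element m: if the first (r - |S|) elements of ys are ≤ m, the run never pops m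
theorem run_bottom (ys : List Int) : ∀ (S : List Int) (r : Int) (m : Int),
    (∀ (t : Nat) (ht : t < ys.length), (t : Int) < r - (S.length : Int) → ys[t] ≤ m) →
    ys.foldl lobbyStep (S ++ [m], r)
      = ((ys.foldl lobbyStep (S, r)).1 ++ [m], (ys.foldl lobbyStep (S, r)).2) := by
  induction ys with
  | nil => intro S r m _; simp
  | cons d ys ih =>
    intro S r m hyp
    simp only [List.foldl_cons, lobbyStep]
    have hsnd := popLoop_snd S r d
    cases hP : (popLoop S r d).1 with
    | cons h' tS =>
      have hfull := popLoop_append_cons S m r d (popLoop S r d).2 h' tS (by rw [← hP])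
      rw [hfull]
      show List.foldl lobbyStep ((d :: h' :: tS) ++ [m], (popLoop S r d).2) ys
          = ((List.foldl lobbyStep (d :: h' :: tS, (popLoop S r d).2) ys).1 ++ [m],
             (List.foldl lobbyStep (d :: h' :: tS, (popLoop S r d).2) ys).2)
      refine ih (d :: h' :: tS) (popLoop S r d).2 m ?_
      intro t ht hlt
      rw [hP] at hsnd
      have h1t : ((t + 1 : Nat) : Int) < r - (S.length : Int) := by
        simp only [List.length_cons] at hsnd hlt
        push_cast at hsnd hlt ⊢
        omega
      have h2 := hyp (t + 1) (by simpa using Nat.succ_lt_succ ht) h1t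
      simpa using h2
    | nil =>
      have hr1 : (popLoop S r d).2 = r - (S.length : Int) := by
        rw [hP] at hsnd; simpa using hsnd
      have hfull := popLoop_append_nil S m r d (popLoop S r d).2 (by rw [← hP])
      have hcond : ¬((popLoop S r d).2 > 0 ∧ m < d) := by
        rintro ⟨hpos, hmd⟩
        rw [hr1] at hpos
        have h0 : ((0 : Nat) : Int) < r - (S.length : Int) := by push_cast; omega
        have hd := hyp 0 (by simp) h0
        simp at hd
        omega
      have hnopop : popLoop [m] (popLoop S r d).2 d = ([m], (popLoop S r d).2) := by
        simp only [popLoop, if_neg hcond]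
      rw [hfull, hnopop]
      show List.foldl lobbyStep ([d] ++ [m], (popLoop S r d).2) ys
          = ((List.foldl lobbyStep ([d], (popLoop S r d).2) ys).1 ++ [m],
             (List.foldl lobbyStep ([d], (popLoop S r d).2) ys).2)
      refine ih [d] (popLoop S r d).2 m ?_
      intro t ht hlt
      rw [hr1] at hlt
      simp only [List.length_cons, List.length_nil] at hlt
      have h1t : ((t + 1 : Nat) : Int) < r - (S.length : Int) := by
        push_cast at hlt ⊢
        omega
      have h2 := hyp (t + 1) (by simpa using Nat.succ_lt_succ ht) h1t
      simpa using h2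

-- main lemma: A's truncated stack equals B's greedy picks
theorem main_eq (k : Nat) : ∀ (xs : List Int), k ≤ xs.length →
    ((xs.foldl lobbyStep ([], (xs.length : Int) - (k : Int))).1.reverse).take k = pickL k xs := by
  induction k with
  | zero => intro xs _; simp [pickL]
  | succ k ih =>
    intro xs hk
    set b : Int := (xs.length : Int) - ((k + 1 : Nat) : Int) with hb
    have hwlen : (xs.take (xs.length - k)).length = xs.length - k := by
      rw [List.length_take]; omega
    obtain ⟨m, hm⟩ : ∃ m, PySem.List.max? (xs.take (xs.length - k)) (fun x => x) = some m := by
      cases hmm : PySem.List.max? (xs.take (xs.length - k)) (fun x => x) with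
      | none =>
        exfalso
        have hnil := (PySem.List.max?_eq_none_iff _ _).mp hmm
        have h2 := hwlen
        rw [hnil] at h2
        simp at h2
        omega
      | some m => exact ⟨m, rfl⟩
    have hmmem : m ∈ xs.take (xs.length - k) := PySem.List.max?_mem hm
    have hmmax : ∀ y ∈ xs.take (xs.length - k), y ≤ m := PySem.List.max?_isMax hm
    obtain ⟨i, hidx⟩ : ∃ i, PySem.List.index? xs m = some i := by
      cases hii : PySem.List.index? xs m with
      | none => exact absurd (List.mem_of_mem_take hmmem) ((PySem.List.index?_eq_none_iff _ _).mp hii)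
      | some i => exact ⟨i, rfl⟩
    obtain ⟨hilt, hxi, hfirst⟩ := PySem.List.getElem_of_index?_eq_some hidx
    have hmemwin : ∀ (j : Nat) (hj : j < xs.length - k), xs[j]'(by omega) ∈ xs.take (xs.length - k) := by
      intro j hj
      have h1 : j < (xs.take (xs.length - k)).length := by rw [hwlen]; exact hj
      have h2 := List.getElem_mem h1
      rwa [List.getElem_take] at h2
    have hiwin : i < xs.length - k := by
      obtain ⟨j, hj, hwj⟩ := List.getElem_of_mem hmmem
      rw [hwlen] at hj
      have hxj : xs[j]'(by omega) = m := by rw [← hwj]; exact (List.getElem_take).symm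
      by_contra hcon
      exact hfirst j (by omega) hxj
    have hpre : ∀ x ∈ xs.take i, x < m := by
      intro x hx
      obtain ⟨j, hj, hwj⟩ := List.getElem_of_mem hx
      rw [List.length_take] at hj
      have hji : j < i := lt_of_lt_of_le hj (min_le_left ..)
      have hxj : xs[j]'(by omega) = x := by rw [← hwj]; exact (List.getElem_take).symm
      refine lt_of_le_of_ne ?_ (by rw [← hxj]; exact hfirst j hji)
      rw [← hxj]
      exact hmmax _ (hmemwin j (by omega))
    have hsplit : xs.foldl lobbyStep ([], b)
        = (xs.drop (i + 1)).foldl lobbyStep ((xs.take (i + 1)).foldl lobbyStep ([], b)) := by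
      conv_lhs => rw [← List.take_append_drop (i + 1) xs]
      rw [List.foldl_append]
    have htake : xs.take (i + 1) = xs.take i ++ [m] := by
      rw [List.take_add_one, List.getElem?_eq_getElem hilt, hxi]
      rfl
    set A₀ := (xs.take i).foldl lobbyStep ([], b) with hA₀
    have hA₀snd : A₀.2 = b + (A₀.1.length : Int) - (i : Int) := by
      have h1 := run_snd (xs.take i) [] b
      rw [List.length_take] at h1
      have hmin : min i xs.length = i := by omega
      rw [hmin] at h1
      rw [← hA₀] at h1
      simpa using h1
    have hA₀mem : ∀ x ∈ A₀.1, x < m := by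
      intro x hx
      rw [hA₀] at hx
      rcases run_mem (xs.take i) [] b x hx with h | h
      · simp at h
      · exact hpre x h
    have hib : (i : Int) ≤ b := by rw [hb]; push_cast; omega
    have hpop : popLoop A₀.1 A₀.2 m = ([], b - (i : Int)) := by
      rw [popLoop_all_lt A₀.1 A₀.2 m hA₀mem (by omega)]
      have hq : A₀.2 - (A₀.1.length : Int) = b - (i : Int) := by omega
      rw [hq]
    have hstage2 : (xs.take (i + 1)).foldl lobbyStep ([], b) = (([] : List Int) ++ [m], b - (i : Int)) := by
      rw [htake, List.foldl_append, ← hA₀]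
      show lobbyStep A₀ m = _
      simp only [lobbyStep, hpop, List.nil_append]
    have hysle : ∀ (t : Nat) (ht : t < (xs.drop (i + 1)).length),
        (t : Int) < b - (i : Int) - ((([] : List Int)).length : Int) → (xs.drop (i + 1))[t] ≤ m := by
      intro t ht hlt
      simp only [List.length_nil, Nat.cast_zero, sub_zero] at hlt
      have hti : i + 1 + t < xs.length - k := by
        rw [hb] at hlt; push_cast at hlt; omega
      rw [List.getElem_drop]
      exact hmmax _ (hmemwin (i + 1 + t) hti)
    have hstage3 := run_bottom (xs.drop (i + 1)) [] (b - (i : Int)) m hysle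
    have hfin : (xs.foldl lobbyStep ([], b)).1
        = ((xs.drop (i + 1)).foldl lobbyStep ([], b - (i : Int))).1 ++ [m] := by
      rw [hsplit, hstage2, hstage3]
    have hbudget : (((xs.drop (i + 1)).length : Int)) - (k : Int) = b - (i : Int) := by
      rw [List.length_drop, hb]
      push_cast [Nat.cast_sub (by omega : i + 1 ≤ xs.length)]
      ring
    have hih := ih (xs.drop (i + 1)) (by rw [List.length_drop]; omega)
    rw [hbudget] at hih
    rw [hfin, List.reverse_append]
    simp only [List.reverse_cons, List.reverse_nil, List.nil_append, List.singleton_append,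
      List.take_succ_cons]
    rw [hih]
    simp only [pickL, hm, hidx]

theorem bank_eq (bank : List Int) :
    bankVal bank = pickNum (min 12 bank.length) bank 0 := by
  by_cases h : 12 ≤ bank.length
  · have hmin : min 12 bank.length = 12 := by omega
    rw [hmin, pickNum_eq_foldl]
    unfold bankVal
    show (List.take 12 (List.foldl lobbyStep ([], (bank.length : Int) - 12) bank).1.reverse).foldl
        (fun st num => st * 10 + num) 0 = _
    have hmain := main_eq 12 bank h
    have hc : ((bank.length : Int) - ((12 : Nat) : Int)) = (bank.length : Int) - 12 := by
      push_cast; ring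
    rw [hc] at hmain
    rw [hmain]
  · have hmin : min 12 bank.length = bank.length := by omega
    rw [hmin, pickNum_eq_foldl]
    unfold bankVal
    show (List.take 12 (List.foldl lobbyStep ([], (bank.length : Int) - 12) bank).1.reverse).foldl
        (fun st num => st * 10 + num) 0 = _
    have hA := run_nonpos bank [] ((bank.length : Int) - 12) (by omega)
    have hB := main_eq bank.length bank le_rfl
    have hc : ((bank.length : Int) - ((bank.length : Nat) : Int)) = (0 : Int) := by ring
    rw [hc, run_nonpos bank [] 0 le_rfl] at hB
    simp only [List.append_nil, List.reverse_reverse] at hB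
    rw [List.take_of_length_le le_rfl] at hB
    rw [hA]
    simp only [List.append_nil, List.reverse_reverse]
    rw [List.take_of_length_le (by omega)]
    rw [← hB]

theorem folds_eq (data : List (List Int)) : ∀ (a : Int),
    data.foldl (fun s bank => s + bankVal bank) a
      = data.foldl (fun total bank => total + pickNum (min 12 bank.length) bank 0) a := by
  intro a
  simp only [bank_eq]

-- ===== VERDICT (by name: the statement is the Claim_ definition above) =====
theorem lobby2_spec : Claim_equal_lobby2 := by
  intro data _
  unfold Spec_lobby2 lobby2 lobby2_alt
  exact folds_eq data 0
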